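-- pv_equiv track=rewrite | github.com/mlops-club/model-envelope | model-envelope/src/model_envelope/freeze_deps_tree.py | remove_dependency
-- ===== SOURCE A (Python) =====
-- from copy import deepcopy
-- from typing import Dict, Sequence, Set
--
-- def get_package_key(package_spec: str) -> str:
--     """Extract the package name without version or other qualifiers"""
--     # Handle various package specification formats
--     if " @ " in package_spec:  # git/url installs
--         package_spec = package_spec.split(" @ ")[0]
--     if "==" in package_spec:  # version specifier
--         package_spec = package_spec.split("==")[0]
--     if ">=" in package_spec:  # minimum version
--         package_spec = package_spec.split(">=")[0]
--     if "<=" in package_spec:  # maximum version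
--         package_spec = package_spec.split("<=")[0]
--     if "~=" in package_spec:  # compatible release
--         package_spec = package_spec.split("~=")[0]
--     return package_spec.strip()
--
-- def remove_dependency(graph: Dict[str, Dict], package_name: str) -> Dict[str, Dict]:
--     """
--     Remove a package and its unique dependencies from the dependency graph.
--     Dependencies that are required by other packages are preserved.
--
--     Args:
--         graph: Dependency graph (treated as immutable)
--         package_name: Package name to remove (without version)
--
--     Returns:
--         New dependency graph with package and its unique dependencies removed
--     """
--
--     def get_all_deps(pkg: str, seen: Set[str] = None) -> Set[str]:
--         """Get all dependencies (direct and transitive) for a package"""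
--         if seen is None:
--             seen = set()
--         pkg_key = get_package_key(pkg)
--         matching_pkg = next((p for p in graph if get_package_key(p) == pkg_key), None)
--         if not matching_pkg or matching_pkg in seen:
--             return seen
--         seen.add(matching_pkg)
--         for dep in graph[matching_pkg]:
--             get_all_deps(dep, seen)
--         return seen
--
--     def get_all_reverse_deps(pkg: str) -> Set[str]:
--         """Get all packages that depend on the given package"""
--         pkg_key = get_package_key(pkg)
--         reverse_deps = set()
--         for parent, deps in graph.items():
--             if any(get_package_key(d) == pkg_key for d in deps) or any(
--                 pkg_key == get_package_key(d) for dep in deps for d in get_all_deps(dep)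
--             ):
--                 reverse_deps.add(parent)
--         return reverse_deps
--
--     # Create a deep copy to ensure no modification of input
--     new_graph = deepcopy(graph)
--
--     # Find the full package spec (with version) in the graph
--     package_to_remove = next(
--         (pkg for pkg in graph if get_package_key(pkg) == package_name), None
--     )
--     if not package_to_remove:
--         return new_graph
--
--     # Get all dependencies of the package to remove
--     deps_to_check = get_all_deps(package_to_remove)
--
--     # Remove the target package
--     del new_graph[package_to_remove]
--
--     # For each dependency, check if it's safe to remove
--     for dep in deps_to_check:
--         if get_package_key(dep) == package_name:
--             continue
--
--         # Get all packages that depend on this dependency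
--         reverse_deps = get_all_reverse_deps(dep)
--
--         # Remove package we're removing from reverse deps
--         reverse_deps = {
--             rd for rd in reverse_deps if get_package_key(rd) != package_name
--         }
--
--         # Remove dependency if it's only used by the package we're removing
--         if not reverse_deps and dep in new_graph:
--             del new_graph[dep]
--
--     return new_graph
-- ===== SOURCE B (Python) =====
-- def get_package_key(package_spec: str) -> str:
--     """Extract the package name without version or other qualifiers"""
--     if " @ " in package_spec:
--         package_spec = package_spec.split(" @ ")[0]
--     if "==" in package_spec:
--         package_spec = package_spec.split("==")[0]
--     if ">=" in package_spec:
--         package_spec = package_spec.split(">=")[0]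
--     if "<=" in package_spec:
--         package_spec = package_spec.split("<=")[0]
--     if "~=" in package_spec:
--         package_spec = package_spec.split("~=")[0]
--     return package_spec.strip()
--
--
-- def remove_dependency(graph, package_name):
--     # Resolve the package spec to remove (first graph key whose key matches)
--     target = next((p for p in graph if get_package_key(p) == package_name), None)
--     if target is None:
--         return {p: dict(v) for p, v in graph.items()}
--     # index: package key -> first graph node with that key
--     first = {}
--     for p in graph:
--         first.setdefault(get_package_key(p), p)
--
--     def succ(p):
--         return [first[get_package_key(d)] for d in graph[p] if get_package_key(d) in first]
--
--     def reach(seeds):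
--         seen = set()
--         stack = list(seeds)
--         while stack:
--             n = stack.pop()
--             if n not in seen:
--                 seen.add(n)
--                 stack.extend(succ(n))
--         return seen
--
--     # everything the removed package (transitively) depends on
--     closure = reach([target])
--     # what every OTHER package still requires: direct dep keys, and all nodes
--     # transitively reachable from their deps -- computed once, by one traversal
--     parents = [p for p in graph if get_package_key(p) != package_name]
--     live_keys = {get_package_key(d) for p in parents for d in graph[p]}
--     seeds = [first[get_package_key(d)] for p in parents for d in graph[p] if get_package_key(d) in first]
--     live = reach(seeds)
--     dead = {x for x in closure
--             if get_package_key(x) != package_name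
--             and get_package_key(x) not in live_keys
--             and x not in live}
--     return {p: dict(v) for p, v in graph.items() if p != target and p not in dead}
-- ===== Notes on version B (the rewrite author's own statement) =====
-- stated objective: faster
-- what changed: A re-runs a recursive closure computation for every parent and every dependency while scanning all parents per removal candidate; B builds a package-key index once and answers all removal checks from two worklist traversals (the removed package's closure, and the set of nodes/keys still required by the other parents) computed once.
-- outside the precondition, e.g. on remove_dependency({'': {'b': 'v'}, 'b': {}}, ''): A returns {'': {'b': 'v'}, 'b': {}}, B returns {}; on remove_dependency({'a': {'': 'v'}, '': {}}, 'a'): A returns {'': {}}, B returns {}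
import Mathlib
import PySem

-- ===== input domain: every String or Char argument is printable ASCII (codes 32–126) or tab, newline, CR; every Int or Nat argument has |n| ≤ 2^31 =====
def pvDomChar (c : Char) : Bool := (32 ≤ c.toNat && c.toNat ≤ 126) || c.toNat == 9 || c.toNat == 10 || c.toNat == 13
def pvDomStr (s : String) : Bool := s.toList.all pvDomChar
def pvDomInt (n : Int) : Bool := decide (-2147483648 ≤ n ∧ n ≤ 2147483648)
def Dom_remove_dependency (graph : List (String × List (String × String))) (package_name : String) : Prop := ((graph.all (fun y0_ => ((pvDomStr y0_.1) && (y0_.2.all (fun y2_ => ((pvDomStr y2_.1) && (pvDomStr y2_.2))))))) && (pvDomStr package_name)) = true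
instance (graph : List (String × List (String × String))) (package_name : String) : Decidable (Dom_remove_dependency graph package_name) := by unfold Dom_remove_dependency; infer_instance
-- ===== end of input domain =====

-- B replaces A's per-dependency, per-parent recomputation of transitive closures by one key index
-- and two graph traversals computed once; equivalence of the RETURN value is proved (neither mutates its input).

-- ===== PORT A =====
-- shared module helper (used verbatim by both Python versions)
def get_package_key (package_spec : String) : String :=
  let s1 := if PySem.Str.isIn " @ " package_spec then ((PySem.Str.split? package_spec " @ ").getD []).headD "" else package_spec
  let s2 := if PySem.Str.isIn "==" s1 then ((PySem.Str.split? s1 "==").getD []).headD "" else s1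
  let s3 := if PySem.Str.isIn ">=" s2 then ((PySem.Str.split? s2 ">=").getD []).headD "" else s2
  let s4 := if PySem.Str.isIn "<=" s3 then ((PySem.Str.split? s3 "<=").getD []).headD "" else s3
  let s5 := if PySem.Str.isIn "~=" s4 then ((PySem.Str.split? s4 "~=").getD []).headD "" else s4
  PySem.Str.strip s5

-- keys of the inner dict graph[m] ('for dep in graph[m]')
def pvDepKeys (g : PySem.Dict String (List (String × String))) (m : String) : List String :=
  (g.getD m []).map Prod.fst

-- A's local get_all_deps (recursive DFS; fuel is a totality guard only, g.size+1 is always enough)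
def pvGetAllDepsA (g : PySem.Dict String (List (String × String))) :
    Nat → String → PySem.Set String → PySem.Set String
  | 0, _, seen => seen
  | fuel+1, pkg, seen =>
    match g.keys.find? (fun p => get_package_key p == get_package_key pkg) with
    | none => seen
    | some m =>
      if m = "" || seen.contains m then seen
      else (pvDepKeys g m).foldl (fun s dep => pvGetAllDepsA g fuel dep s) (PySem.Set.add seen m)

-- A's local get_all_reverse_deps
def pvGetAllRevA (g : PySem.Dict String (List (String × String))) (pkg : String) : PySem.Set String :=
  let pkg_key := get_package_key pkg
  g.items.foldl (fun rd pd =>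
    if (pd.2.map Prod.fst).any (fun d => get_package_key d == pkg_key)
       || (pd.2.map Prod.fst).any (fun dep =>
            (pvGetAllDepsA g (g.size+1) dep []).any (fun d => pkg_key == get_package_key d))
    then PySem.Set.add rd pd.1 else rd) []

def remove_dependency (graph : List (String × List (String × String))) (package_name : String) :
    List (String × List (String × String)) :=
  let g := PySem.Dict.ofList graph
  let new0 := g   -- deepcopy
  match g.keys.find? (fun pkg => get_package_key pkg == package_name) with
  | none => new0.items
  | some tgt =>
    if tgt = "" then new0.items   -- 'if not package_to_remove'
    else
      let deps_to_check := pvGetAllDepsA g (g.size+1) tgt []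
      let new1 := new0.erase tgt
      (deps_to_check.foldl (fun ng dep =>
        if get_package_key dep == package_name then ng
        else
          let rdeps := (pvGetAllRevA g dep).filter (fun rd => !(get_package_key rd == package_name))
          if rdeps.isEmpty && ng.contains dep then ng.erase dep else ng) new1).items

-- ===== PORT B =====
-- index: package key -> first graph node with that key (Source B's 'first', built by setdefault)
def pvFirstB (g : PySem.Dict String (List (String × String))) : PySem.Dict String String :=
  g.keys.foldl (fun d p => d.setdefault (get_package_key p) p) PySem.Dict.empty

-- Source B's 'succ(p)'
def pvSuccB (g : PySem.Dict String (List (String × String)))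
    (first : PySem.Dict String String) (p : String) : List String :=
  (pvDepKeys g p).filterMap (fun d => first.get? (get_package_key d))

-- Source B's 'reach' worklist loop (stack.pop() pops the last element; fuel is a totality guard only)
def pvReachB (succ : String → List String) : Nat → List String → PySem.Set String → PySem.Set String
  | 0, _, seen => seen
  | fuel+1, stack, seen =>
    match PySem.List.pop? stack with
    | none => seen
    | some (n, rest) =>
      if seen.contains n then pvReachB succ fuel rest seen
      else pvReachB succ fuel (rest ++ succ n) (PySem.Set.add seen n)

def remove_dependency_alt (graph : List (String × List (String × String))) (package_name : String) :
    List (String × List (String × String)) :=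
  let g := PySem.Dict.ofList graph
  match g.keys.find? (fun p => get_package_key p == package_name) with
  | none => g.items
  | some target =>
    let first := pvFirstB g
    let succ := fun p => pvSuccB g first p
    let fuelOf := fun (seeds : List String) =>
      seeds.length + (g.keys.map (fun p => 1 + (succ p).length)).sum
    let closure := pvReachB succ (fuelOf [target]) [target] []
    let parents := g.keys.filter (fun p => !(get_package_key p == package_name))
    let live_keys := PySem.Set.ofList (parents.flatMap (fun p => (pvDepKeys g p).map get_package_key))
    let seeds := parents.flatMap (fun p => (pvDepKeys g p).filterMap (fun d => first.get? (get_package_key d)))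
    let live := pvReachB succ (fuelOf seeds) seeds []
    let dead := closure.filter (fun x =>
      !(get_package_key x == package_name) && !(live_keys.contains (get_package_key x)) && !(live.contains x))
    g.items.filter (fun pv => !(pv.1 == target) && !(dead.contains pv.1))

-- ===== PRECONDITION & SPEC =====
-- Pre_ excludes graphs in which the empty string is a RESOLVABLE package (the first graph key whose
-- package key is "" is "" itself): there A's truthiness tests ('if not package_to_remove',
-- 'if not matching_pkg') accidentally treat that package as missing, a defensible-corner artefact of
-- A's implementation; B treats it as an ordinary node.
def Pre_remove_dependency (graph : List (String × List (String × String))) (package_name : String) : Prop :=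
  ¬ ((graph.map Prod.fst).find? (fun p => get_package_key p == "") = some "")
instance (graph : List (String × List (String × String))) (package_name : String) : Decidable (Pre_remove_dependency graph package_name) := by unfold Pre_remove_dependency; infer_instance
def pvWitness_remove_dependency : (List (String × List (String × String))) × String :=
  ([("a==1", [("b", "")]), ("b", [])], "a")

def Spec_remove_dependency (graph : List (String × List (String × String))) (package_name : String) (out : List (String × List (String × String))) : Prop := out = remove_dependency_alt graph package_name
instance (graph : List (String × List (String × String))) (package_name : String) (out : List (String × List (String × String))) : Decidable (Spec_remove_dependency graph package_name out) := by unfold Spec_remove_dependency; infer_instance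

-- ===== CLAIM (what is proved, stated in full; the proofs are below) =====
def Claim_equal_remove_dependency : Prop := ∀ (graph : List (String × List (String × String))) (package_name : String), Dom_remove_dependency graph package_name → Pre_remove_dependency graph package_name → Spec_remove_dependency graph package_name (remove_dependency graph package_name)

-- ===== LEMMAS AND PROOFS =====

def pvR (g : PySem.Dict String (List (String × String))) (k : String) : Option String :=
  g.keys.find? (fun p => get_package_key p == k)

def pvStep (g : PySem.Dict String (List (String × String))) (m n : String) : Prop :=
  ∃ dk ∈ pvDepKeys g m, pvR g (get_package_key dk) = some n

def pvReach (g : PySem.Dict String (List (String × String))) : String → String → Prop :=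
  Relation.ReflTransGen (pvStep g)

def pvCanon (g : PySem.Dict String (List (String × String))) (m : String) : Prop :=
  pvR g (get_package_key m) = some m

def pvUnseen (g : PySem.Dict String (List (String × String))) (seen : List String) : Nat :=
  (g.keys.filter (fun p => !seen.contains p)).length

def pvWsum (g : PySem.Dict String (List (String × String))) (succ : String → List String)
    (seen : List String) : Nat :=
  ((g.keys.filter (fun p => !seen.contains p)).map (fun p => 1 + (succ p).length)).sum

lemma pvR_some (g : PySem.Dict String (List (String × String))) {k m : String}
    (h : pvR g k = some m) : m ∈ g.keys ∧ get_package_key m = k ∧ pvCanon g m := by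
  have h1 : get_package_key m = k := by simpa using List.find?_some h
  exact ⟨List.mem_of_find?_eq_some h, h1, by unfold pvCanon; rw [h1]; exact h⟩

lemma pvStep_canon (g : PySem.Dict String (List (String × String))) {m n : String}
    (h : pvStep g m n) : pvCanon g n := by
  obtain ⟨dk, _, hr⟩ := h
  exact (pvR_some g hr).2.2

lemma pvCanon_reach (g : PySem.Dict String (List (String × String))) {m n : String}
    (hc : pvCanon g m) (h : pvReach g m n) : pvCanon g n := by
  induction h with
  | refl => exact hc
  | tail _ h2 _ => exact pvStep_canon g h2

lemma pvCanon_key_inj (g : PySem.Dict String (List (String × String))) {x y : String}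
    (hx : pvCanon g x) (hy : pvCanon g y) (h : get_package_key x = get_package_key y) : x = y := by
  unfold pvCanon at hx hy
  rw [h] at hx
  rw [hx] at hy
  exact (Option.some_inj.mp hy)

-- removing a freshly-seen node m from the unseen set drops its weight from the sum
lemma pvSum_filter_add (w : String → Nat) (l : List String) (hnd : l.Nodup)
    (s : List String) (m : String) (hm : m ∈ l) (hms : m ∉ s) :
    ((l.filter (fun p => !(PySem.Set.add s m).contains p)).map w).sum + w m
      = ((l.filter (fun p => !s.contains p)).map w).sum := by
  have hadd : PySem.Set.add s m = s ++ [m] := PySem.Set.add_of_not_mem hms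
  have h1 : l.filter (fun p => !(PySem.Set.add s m).contains p)
      = (l.filter (fun p => !s.contains p)).filter (fun p => !(p == m)) := by
    rw [List.filter_filter]
    apply List.filter_congr
    intro p _
    rw [hadd]
    simp [Bool.beq_eq_decide_eq, Bool.and_comm]
  set L := l.filter (fun p => !s.contains p) with hL
  have hndL : L.Nodup := hnd.filter _
  have hmL : m ∈ L := by
    rw [hL, List.mem_filter]
    exact ⟨hm, by simpa using hms⟩
  have h2 : L.filter (fun p => !(p == m)) = L.erase m := by
    rw [List.Nodup.erase_eq_filter hndL m]
    apply List.filter_congr; intro p _; simp [bne, Bool.beq_eq_decide_eq]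
  have h3 : (L.map w).sum = ((m :: L.erase m).map w).sum :=
    List.Perm.sum_nat (List.Perm.map w (List.perm_cons_erase hmL))
  rw [h1, h2]
  simp at h3
  omega

lemma pvUnseen_mono (g : PySem.Dict String (List (String × String))) {s s' : List String}
    (h : ∀ z ∈ s, z ∈ s') : pvUnseen g s' ≤ pvUnseen g s := by
  apply List.Sublist.length_le
  apply List.monotone_filter_right
  intro p hp
  simp only [Bool.not_eq_true', ← Bool.not_eq_true] at hp ⊢
  intro hc
  exact hp (List.contains_iff_mem.mpr (h p (List.contains_iff_mem.mp hc)))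

lemma pvUnseen_add (g : PySem.Dict String (List (String × String))) (hnd : g.keys.Nodup)
    {seen : List String} {m : String} (hm : m ∈ g.keys) (hms : m ∉ seen) :
    pvUnseen g (PySem.Set.add seen m) + 1 = pvUnseen g seen := by
  have h := pvSum_filter_add (fun _ => 1) g.keys hnd seen m hm hms
  simpa [pvUnseen] using h

lemma pvWsum_add (g : PySem.Dict String (List (String × String)))
    (succ : String → List String) (hnd : g.keys.Nodup)
    {seen : List String} {m : String} (hm : m ∈ g.keys) (hms : m ∉ seen) :
    pvWsum g succ (PySem.Set.add seen m) + (1 + (succ m).length) = pvWsum g succ seen :=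
  pvSum_filter_add (fun p => 1 + (succ p).length) g.keys hnd seen m hm hms

lemma pvUnseen_pos (g : PySem.Dict String (List (String × String)))
    {seen : List String} {m : String} (hm : m ∈ g.keys) (hms : m ∉ seen) :
    1 ≤ pvUnseen g seen := by
  have : m ∈ g.keys.filter (fun p => !seen.contains p) :=
    List.mem_filter.mpr ⟨hm, by simpa using hms⟩
  have := List.length_pos_of_mem this
  unfold pvUnseen
  omega

-- the DFS fold over a dependency list, given the induction hypothesis for one call
lemma pvDfs_fold (g : PySem.Dict String (List (String × String))) (f' : Nat)
    (IH : ∀ (seen : List String) (x : String), pvUnseen g seen ≤ f' →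
      (∀ z ∈ seen, z ∈ pvGetAllDepsA g (f'+1) x seen) ∧
      (∀ z ∈ pvGetAllDepsA g (f'+1) x seen, z ∈ seen ∨ ∃ m, pvR g (get_package_key x) = some m ∧ pvReach g m z) ∧
      (∀ m, pvR g (get_package_key x) = some m → m ∈ pvGetAllDepsA g (f'+1) x seen) ∧
      (∀ z ∈ pvGetAllDepsA g (f'+1) x seen, z ∉ seen → ∀ n, pvStep g z n → n ∈ pvGetAllDepsA g (f'+1) x seen)) :
    ∀ (deps : List String) (s0 : List String), pvUnseen g s0 ≤ f' →
      (∀ z ∈ s0, z ∈ deps.foldl (fun s dep => pvGetAllDepsA g (f'+1) dep s) s0) ∧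
      (∀ z ∈ deps.foldl (fun s dep => pvGetAllDepsA g (f'+1) dep s) s0,
         z ∈ s0 ∨ ∃ d ∈ deps, ∃ m, pvR g (get_package_key d) = some m ∧ pvReach g m z) ∧
      (∀ d ∈ deps, ∀ m, pvR g (get_package_key d) = some m →
         m ∈ deps.foldl (fun s dep => pvGetAllDepsA g (f'+1) dep s) s0) ∧
      (∀ z ∈ deps.foldl (fun s dep => pvGetAllDepsA g (f'+1) dep s) s0, z ∉ s0 →
         ∀ n, pvStep g z n → n ∈ deps.foldl (fun s dep => pvGetAllDepsA g (f'+1) dep s) s0) := by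
  intro deps
  induction deps with
  | nil =>
    intro s0 _
    exact ⟨fun z hz => hz, fun z hz => Or.inl hz, by simp, fun z hz hz0 => absurd hz hz0⟩
  | cons d rest ihr =>
    intro s0 hcnt
    simp only [List.foldl_cons]
    obtain ⟨ha1, hb1, hc1, hd1⟩ := IH s0 d hcnt
    have hs1cnt : pvUnseen g (pvGetAllDepsA g (f'+1) d s0) ≤ f' :=
      le_trans (pvUnseen_mono g (fun z hz => ha1 z hz)) hcnt
    obtain ⟨ha2, hb2, hc2, hd2⟩ := ihr (pvGetAllDepsA g (f'+1) d s0) hs1cnt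
    refine ⟨fun z hz => ha2 z (ha1 z hz), ?_, ?_, ?_⟩
    · intro z hz
      rcases hb2 z hz with h | ⟨d', hd', hm⟩
      · rcases hb1 z h with h' | ⟨m, hm1, hm2⟩
        · exact Or.inl h'
        · exact Or.inr ⟨d, by simp, m, hm1, hm2⟩
      · exact Or.inr ⟨d', List.mem_cons_of_mem _ hd', hm⟩
    · intro d' hd' m hm
      rcases List.mem_cons.mp hd' with rfl | h
      · exact ha2 _ (hc1 m hm)
      · exact hc2 d' h m hm
    · intro z hz hz0 n hstep
      by_cases hzs1 : z ∈ pvGetAllDepsA g (f'+1) d s0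
      · exact ha2 _ (hd1 z hzs1 hz0 n hstep)
      · exact hd2 z hz hzs1 n hstep

lemma pvDfs_main (g : PySem.Dict String (List (String × String)))
    (hnd : g.keys.Nodup) (hne : ∀ k m, pvR g k = some m → m ≠ "") :
    ∀ (fuel : Nat) (seen : List String) (x : String), pvUnseen g seen ≤ fuel →
      (∀ z ∈ seen, z ∈ pvGetAllDepsA g (fuel+1) x seen) ∧
      (∀ z ∈ pvGetAllDepsA g (fuel+1) x seen, z ∈ seen ∨ ∃ m, pvR g (get_package_key x) = some m ∧ pvReach g m z) ∧
      (∀ m, pvR g (get_package_key x) = some m → m ∈ pvGetAllDepsA g (fuel+1) x seen) ∧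
      (∀ z ∈ pvGetAllDepsA g (fuel+1) x seen, z ∉ seen → ∀ n, pvStep g z n → n ∈ pvGetAllDepsA g (fuel+1) x seen) := by
  intro fuel
  induction fuel with
  | zero =>
    intro seen x hcnt
    simp only [pvGetAllDepsA]
    cases hres : g.keys.find? (fun p => get_package_key p == get_package_key x) with
    | none =>
      exact ⟨fun z hz => hz, fun z hz => Or.inl hz,
        fun m hm => absurd (hres ▸ hm : (none : Option String) = some m) (by simp),
        fun z hz hz0 => absurd hz hz0⟩
    | some m =>
      obtain ⟨hmk, hkey, hcanon⟩ := pvR_some g (show pvR g (get_package_key x) = some m from hres)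
      have hmem : m ∈ seen := by
        by_contra hmem
        have := pvUnseen_pos g hmk hmem
        omega
      have hres' : pvR g (get_package_key x) = some m := hres
      have hcond : (decide (m = "") || PySem.Set.contains seen m) = true := by
        rw [Bool.or_eq_true]
        exact Or.inr ((PySem.Set.contains_iff seen m).mpr hmem)
      simp only [hcond, if_true]
      refine ⟨fun z hz => hz, fun z hz => Or.inl hz, ?_, fun z hz hz0 => absurd hz hz0⟩
      intro m' hm'
      obtain rfl : m = m' := Option.some_inj.mp (hres'.symm.trans hm')
      exact hmem
  | succ f' ihf =>
    intro seen x hcnt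
    simp only [pvGetAllDepsA]
    cases hres : g.keys.find? (fun p => get_package_key p == get_package_key x) with
    | none =>
      exact ⟨fun z hz => hz, fun z hz => Or.inl hz,
        fun m hm => absurd (hres ▸ hm : (none : Option String) = some m) (by simp),
        fun z hz hz0 => absurd hz hz0⟩
    | some m =>
      obtain ⟨hmk, hkey, hcanon⟩ := pvR_some g (show pvR g (get_package_key x) = some m from hres)
      have hres' : pvR g (get_package_key x) = some m := hres
      have hme : ¬(m = "") := hne _ m hres'
      by_cases hmem : m ∈ seen
      · have hcond : (decide (m = "") || PySem.Set.contains seen m) = true := by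
          rw [Bool.or_eq_true]
          exact Or.inr ((PySem.Set.contains_iff seen m).mpr hmem)
        simp only [hcond, if_true]
        refine ⟨fun z hz => hz, fun z hz => Or.inl hz, ?_, fun z hz hz0 => absurd hz hz0⟩
        intro m' hm'
        obtain rfl : m = m' := Option.some_inj.mp (hres'.symm.trans hm')
        exact hmem
      · have hcond : (decide (m = "") || PySem.Set.contains seen m) = false := by
          rw [Bool.or_eq_false_iff]
          exact ⟨decide_eq_false hme,
            Bool.eq_false_iff.mpr (fun h => hmem ((PySem.Set.contains_iff seen m).mp h))⟩
        simp only [hcond, Bool.false_eq_true, if_false]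
        have hcnt' : pvUnseen g (PySem.Set.add seen m) ≤ f' := by
          have := pvUnseen_add g hnd hmk hmem
          omega
        obtain ⟨fa, fb, fc, fd⟩ := pvDfs_fold g f' ihf (pvDepKeys g m) (PySem.Set.add seen m) hcnt'
        have hmadd : m ∈ PySem.Set.add seen m := (PySem.Set.mem_add _ _ _).mpr (Or.inr rfl)
        refine ⟨?_, ?_, ?_, ?_⟩
        · intro z hz
          exact fa z ((PySem.Set.mem_add _ _ _).mpr (Or.inl hz))
        · intro z hz
          rcases fb z hz with h | ⟨d, hd, m', hm1, hm2⟩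
          · rcases (PySem.Set.mem_add _ _ _).mp h with h' | hzm
            · exact Or.inl h'
            · exact Or.inr ⟨m, hres', by rw [hzm]; exact Relation.ReflTransGen.refl⟩
          · exact Or.inr ⟨m, hres', Relation.ReflTransGen.head ⟨d, hd, hm1⟩ hm2⟩
        · intro m' hm'
          obtain rfl : m = m' := Option.some_inj.mp (hres'.symm.trans hm')
          exact fa m hmadd
        · intro z hz hz0 n hstep
          by_cases hzm : z = m
          · subst hzm
            obtain ⟨dk, hdk, hr⟩ := hstep
            exact fc dk hdk n hr
          · have : z ∉ PySem.Set.add seen m := by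
              rw [PySem.Set.mem_add]
              rintro (h | rfl)
              · exact hz0 h
              · exact hzm rfl
            exact fd z hz this n hstep

lemma pvDfs_char (g : PySem.Dict String (List (String × String)))
    (hnd : g.keys.Nodup) (hne : ∀ k m, pvR g k = some m → m ≠ "") (x z : String) :
    z ∈ pvGetAllDepsA g (g.size+1) x [] ↔
      ∃ m, pvR g (get_package_key x) = some m ∧ pvReach g m z := by
  have hsz : pvUnseen g [] ≤ g.size := by
    simp [pvUnseen, PySem.Dict.size, PySem.Dict.keys]
  obtain ⟨_, hb, hc, hd⟩ := pvDfs_main g hnd hne g.size [] x hsz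
  constructor
  · intro hz
    rcases hb z hz with h | h
    · simp at h
    · exact h
  · rintro ⟨m, hm, hr⟩
    induction hr with
    | refl => exact hc m hm
    | tail _ h2 ih => exact hd _ ih (by simp) _ h2

lemma pvBfs_main (g : PySem.Dict String (List (String × String)))
    (succ : String → List String) (hnd : g.keys.Nodup)
    (hsucc : ∀ p n, n ∈ succ p ↔ pvStep g p n) :
    ∀ (fuel : Nat) (stack seen : List String),
      stack.length + pvWsum g succ seen ≤ fuel →
      (∀ s ∈ stack, pvCanon g s) →
      (∀ z ∈ seen, z ∈ pvReachB succ fuel stack seen) ∧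
      (∀ z ∈ pvReachB succ fuel stack seen, z ∈ seen ∨ ∃ s ∈ stack, pvReach g s z) ∧
      (∀ s ∈ stack, s ∈ pvReachB succ fuel stack seen) ∧
      (∀ z ∈ pvReachB succ fuel stack seen, z ∉ seen → ∀ n, pvStep g z n → n ∈ pvReachB succ fuel stack seen) := by
  intro fuel
  induction fuel with
  | zero =>
    intro stack seen hm _
    have hstack : stack = [] := List.eq_nil_of_length_eq_zero (by omega)
    subst hstack
    exact ⟨fun z hz => hz, fun z hz => Or.inl hz, by simp, fun z hz hz0 => absurd hz hz0⟩
  | succ f ih =>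
    intro stack seen hm hcan
    rcases List.eq_nil_or_concat stack with rfl | ⟨ys, n, rfl⟩
    · simp only [pvReachB]
      rw [show PySem.List.pop? ([] : List String) = none from rfl]
      exact ⟨fun z hz => hz, fun z hz => Or.inl hz, by simp, fun z hz hz0 => absurd hz hz0⟩
    · rw [List.concat_eq_append] at *
      have hpop : PySem.List.pop? (ys ++ [n]) = some (n, ys) := PySem.List.pop?_last ys n
      simp only [pvReachB, hpop]
      have hcn : pvCanon g n := hcan n (by simp)
      by_cases hns : n ∈ seen
      · have hcontains : PySem.Set.contains seen n = true := (PySem.Set.contains_iff seen n).mpr hns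
        simp only [hcontains, if_true]
        have hm' : ys.length + pvWsum g succ seen ≤ f := by
          rw [List.length_append] at hm; simp at hm; omega
        obtain ⟨iha, ihb, ihc, ihd⟩ := ih ys seen hm' (fun s hs => hcan s (List.mem_append_left _ hs))
        refine ⟨iha, ?_, ?_, ihd⟩
        · intro z hz
          rcases ihb z hz with h | ⟨s, hs, hr⟩
          · exact Or.inl h
          · exact Or.inr ⟨s, List.mem_append_left _ hs, hr⟩
        · intro s hs
          rcases List.mem_append.mp hs with h | h
          · exact ihc s h
          · have : s = n := by simpa using h
            subst this
            exact iha s hns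
      · have hcontains : PySem.Set.contains seen n = false :=
          Bool.eq_false_iff.mpr (fun h => hns ((PySem.Set.contains_iff seen n).mp h))
        simp only [hcontains, Bool.false_eq_true, if_false]
        have hnk : n ∈ g.keys := (pvR_some g hcn).1
        have hws := pvWsum_add g succ hnd hnk hns
        have hm' : (ys ++ succ n).length + pvWsum g succ (PySem.Set.add seen n) ≤ f := by
          rw [List.length_append] at hm ⊢
          simp at hm
          omega
        have hcan' : ∀ s ∈ ys ++ succ n, pvCanon g s := by
          intro s hs
          rcases List.mem_append.mp hs with h | h
          · exact hcan s (List.mem_append_left _ h)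
          · exact pvStep_canon g ((hsucc n s).mp h)
        obtain ⟨iha, ihb, ihc, ihd⟩ := ih (ys ++ succ n) (PySem.Set.add seen n) hm' hcan'
        have hnadd : n ∈ PySem.Set.add seen n := (PySem.Set.mem_add _ _ _).mpr (Or.inr rfl)
        refine ⟨?_, ?_, ?_, ?_⟩
        · intro z hz
          exact iha z ((PySem.Set.mem_add _ _ _).mpr (Or.inl hz))
        · intro z hz
          rcases ihb z hz with h | ⟨s, hs, hr⟩
          · rcases (PySem.Set.mem_add _ _ _).mp h with h' | hzn
            · exact Or.inl h'
            · exact Or.inr ⟨n, by simp, by rw [hzn]; exact Relation.ReflTransGen.refl⟩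
          · rcases List.mem_append.mp hs with h' | h'
            · exact Or.inr ⟨s, List.mem_append_left _ h', hr⟩
            · exact Or.inr ⟨n, by simp, Relation.ReflTransGen.head ((hsucc n s).mp h') hr⟩
        · intro s hs
          rcases List.mem_append.mp hs with h | h
          · exact ihc s (List.mem_append_left _ h)
          · have : s = n := by simpa using h
            subst this
            exact iha s hnadd
        · intro z hz hz0 w hstep
          by_cases hzn : z = n
          · subst hzn
            exact ihc w (List.mem_append_right _ ((hsucc z w).mpr hstep))
          · have : z ∉ PySem.Set.add seen n := by
              rw [PySem.Set.mem_add]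
              rintro (h | h)
              · exact hz0 h
              · exact hzn h
            exact ihd z hz this w hstep

lemma pvBfs_char (g : PySem.Dict String (List (String × String)))
    (succ : String → List String) (hnd : g.keys.Nodup)
    (hsucc : ∀ p n, n ∈ succ p ↔ pvStep g p n)
    (seeds : List String) (hsd : ∀ s ∈ seeds, pvCanon g s) (z : String) :
    z ∈ pvReachB succ (seeds.length + (g.keys.map (fun p => 1 + (succ p).length)).sum) seeds [] ↔
      ∃ s ∈ seeds, pvReach g s z := by
  have hw : pvWsum g succ [] = (g.keys.map (fun p => 1 + (succ p).length)).sum := by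
    unfold pvWsum
    congr 1
    congr 1
    simp
  obtain ⟨_, hb, hc, hd⟩ := pvBfs_main g succ hnd hsucc
    (seeds.length + (g.keys.map (fun p => 1 + (succ p).length)).sum) seeds [] (by omega) hsd
  constructor
  · intro hz
    rcases hb z hz with h | h
    · simp at h
    · exact h
  · rintro ⟨s, hs, hr⟩
    induction hr with
    | refl => exact hc s hs
    | tail _ h2 ih => exact hd _ ih (by simp) _ h2

-- Source B's 'first' index looked up at k is exactly A's resolution of key k
lemma pvSetdefault_fold_get? :
    ∀ (l : List String) (d : PySem.Dict String String) (k : String),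
      (l.foldl (fun d p => d.setdefault (get_package_key p) p) d).get? k
        = (d.get? k).or (l.find? (fun p => get_package_key p == k)) := by
  intro l
  induction l with
  | nil => intro d k; simp
  | cons p l ih =>
    intro d k
    simp only [List.foldl_cons, List.find?_cons]
    rw [ih]
    by_cases hc : d.contains (get_package_key p) = true
    · rw [PySem.Dict.setdefault, if_pos hc]
      by_cases hkp : (get_package_key p == k) = true
      · have hk : get_package_key p = k := by simpa using hkp
        rw [hk] at hc
        have : (d.get? k).isSome := by rw [← PySem.Dict.contains_eq_isSome_get?]; exact hc
        obtain ⟨v, hv⟩ := Option.isSome_iff_exists.mp this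
        rw [hv]
        simp [hkp]
      · simp only [hkp]
    · rw [PySem.Dict.setdefault, if_neg hc]
      simp only [PySem.Dict.get?]
      rw [List.find?_append, Option.map_or]
      rcases h1 : List.find? (fun q => q.1 == k) d.items with _ | v
      · simp only [h1, Option.map_none, Option.none_or, List.find?_singleton]
        by_cases hkp : (get_package_key p == k) = true
        · simp [hkp]
        · simp [hkp]
      · simp [h1]

lemma pvFirstB_get? (g : PySem.Dict String (List (String × String))) (k : String) :
    (pvFirstB g).get? k = pvR g k := by
  unfold pvFirstB pvR
  rw [pvSetdefault_fold_get?]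
  simp

lemma mem_pvSuccB (g : PySem.Dict String (List (String × String))) (p n : String) :
    n ∈ pvSuccB g (pvFirstB g) p ↔ pvStep g p n := by
  unfold pvSuccB pvStep
  simp only [List.mem_filterMap, pvFirstB_get?]

-- the removal loop of A erases exactly the dependencies satisfying its (graph-only) condition
lemma pvEraseFold_items (pn : String) (cond : String → Bool) :
    ∀ (deps : List String) (d : PySem.Dict String (List (String × String))),
      (deps.foldl (fun ng dep => if get_package_key dep == pn then ng
          else if cond dep && ng.contains dep then ng.erase dep else ng) d).items
      = d.items.filter (fun pv => deps.all (fun dep => !((!(get_package_key dep == pn)) && cond dep && pv.1 == dep))) := by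
  intro deps
  induction deps with
  | nil => intro d; simp
  | cons dep rest ih =>
    intro d
    simp only [List.foldl_cons]
    rw [ih]
    have hstep : (if get_package_key dep == pn then d
        else if cond dep && d.contains dep then d.erase dep else d).items
        = d.items.filter (fun pv => !((!(get_package_key dep == pn)) && cond dep && pv.1 == dep)) := by
      by_cases h1 : (get_package_key dep == pn) = true
      · rw [if_pos h1]
        symm
        rw [List.filter_eq_self]
        intro pv _
        simp [h1]
      · rw [if_neg (by simp [h1])]
        have h1f : (get_package_key dep == pn) = false := Bool.eq_false_iff.mpr h1
        by_cases h2 : cond dep = true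
        · by_cases h3 : d.contains dep = true
          · rw [if_pos (by rw [h2, h3]; rfl)]
            show List.filter _ d.items = _
            apply List.filter_congr
            intro pv _
            simp [h1f, h2]
          · rw [if_neg (by simp [h3])]
            symm
            rw [List.filter_eq_self]
            intro pv hpv
            have : (pv.1 == dep) = false := by
              have h3f : d.items.any (fun q => q.1 == dep) = false := Bool.eq_false_iff.mpr h3
              exact Bool.eq_false_iff.mpr (List.any_eq_false.mp h3f pv hpv)
            simp [this]
        · rw [if_neg (by simp [h2])]
          symm
          rw [List.filter_eq_self]
          intro pv _
          simp [Bool.eq_false_iff.mpr h2]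
    rw [hstep, List.filter_filter]
    apply List.filter_congr
    intro pv _
    simp [List.all_cons, Bool.and_comm]

-- find? sees through dedup: the first matching element of set(l) is the first matching element of l
lemma pvFind?_filter_ne {p : String → Bool} (x : String) (hx : p x = false) :
    ∀ (l : List String), List.find? p (l.filter (fun y => !(y == x))) = List.find? p l := by
  intro l
  induction l with
  | nil => rfl
  | cons a l ih =>
    by_cases hax : (a == x) = true
    · have : a = x := by simpa using hax
      subst this
      simp only [List.filter_cons, hax, Bool.not_true, Bool.false_eq_true, if_false]
      rw [ih, List.find?_cons, hx]
    · have hax' : (!(a == x)) = true := by simp [hax]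
      simp only [List.filter_cons, hax', if_true]
      rw [List.find?_cons, List.find?_cons]
      cases hpa : p a
      · exact ih
      · rfl
lemma pvFind?_ofList (p : String → Bool) :
    ∀ (l : List String), List.find? p (PySem.Set.ofList l) = List.find? p l := by
  intro l
  induction l with
  | nil => rfl
  | cons a l ih =>
    rw [PySem.Set.ofList_cons, List.find?_cons, List.find?_cons]
    cases hpa : p a
    · show List.find? p (PySem.Set.discard (PySem.Set.ofList l) a) = _
      rw [PySem.Set.discard, pvFind?_filter_ne a hpa, ih]
    · rfl

lemma pvKeys_ofList (graph : List (String × List (String × String))) :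
    (PySem.Dict.ofList graph).keys = PySem.Set.ofList (graph.map Prod.fst) := by
  show (List.foldl (fun acc p => acc.insert p.1 p.2) PySem.Dict.empty graph).keys = _
  rw [PySem.Dict.keys_foldl_insert_key graph Prod.fst (fun d x => x.2) PySem.Dict.empty]
  show PySem.Set.update [] _ = _
  rw [PySem.Set.update_nil_left]

-- membership in A's get_all_reverse_deps result
lemma pvRevA_mem (g : PySem.Dict String (List (String × String))) (x z : String) :
    z ∈ pvGetAllRevA g x ↔ ∃ pd ∈ g.items,
      ((pd.2.map Prod.fst).any (fun d => get_package_key d == get_package_key x)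
        || (pd.2.map Prod.fst).any (fun dep =>
             (pvGetAllDepsA g (g.size+1) dep []).any (fun d => get_package_key x == get_package_key d))) = true
      ∧ z = pd.1 := by
  unfold pvGetAllRevA
  rw [PySem.List.foldl_if_eq_foldl_filter
    (fun pd => ((pd.2.map Prod.fst).any (fun d => get_package_key d == get_package_key x)
        || (pd.2.map Prod.fst).any (fun dep =>
             (pvGetAllDepsA g (g.size+1) dep []).any (fun d => get_package_key x == get_package_key d))))
    (fun rd pd => PySem.Set.add rd pd.1) g.items []]
  rw [show (fun rd (pd : String × List (String × String)) => PySem.Set.add rd pd.1) = (fun s pd => PySem.Set.add s ((fun (pd : String × List (String × String)) => pd.1) pd)) from rfl]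
  rw [PySem.Set.mem_foldl_add _ (fun (pd : String × List (String × String)) => pd.1) [] z]
  simp only [List.mem_filter, List.not_mem_nil, false_or]
  constructor
  · rintro ⟨pd, ⟨hpd, hcond⟩, rfl⟩
    exact ⟨pd, hpd, hcond, rfl⟩
  · rintro ⟨pd, hpd, hcond, rfl⟩
    exact ⟨pd, ⟨hpd, hcond⟩, rfl⟩

-- transport: some reachable node shares x's key  ↔  x itself is reachable (x canonical)
lemma pvTrans_iff (g : PySem.Dict String (List (String × String)))
    (hnd : g.keys.Nodup) (hne : ∀ k m, pvR g k = some m → m ≠ "") {x : String} (hx : pvCanon g x) (dep : String) :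
    (∃ n, n ∈ pvGetAllDepsA g (g.size+1) dep [] ∧ get_package_key x = get_package_key n) ↔
      ∃ m, pvR g (get_package_key dep) = some m ∧ pvReach g m x := by
  constructor
  · rintro ⟨n, hn, hk⟩
    obtain ⟨m, hm, hr⟩ := (pvDfs_char g hnd hne dep n).mp hn
    have hcn : pvCanon g n := pvCanon_reach g (pvR_some g hm).2.2 hr
    have hxn : x = n := pvCanon_key_inj g hx hcn hk
    exact ⟨m, hm, hxn ▸ hr⟩
  · rintro ⟨m, hm, hr⟩
    exact ⟨x, (pvDfs_char g hnd hne dep x).mpr ⟨m, hm, hr⟩, rfl⟩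

-- A's emptiness test of the filtered reverse-deps, as two reachability statements
lemma pvCondA_iff (g : PySem.Dict String (List (String × String)))
    (hnd : g.keys.Nodup) (hne : ∀ k m, pvR g k = some m → m ≠ "") (pn : String) {x : String} (hx : pvCanon g x) :
    (((pvGetAllRevA g x).filter (fun rd => !(get_package_key rd == pn))).isEmpty = true) ↔
      ((¬ ∃ p ∈ g.keys, get_package_key p ≠ pn ∧ ∃ d ∈ pvDepKeys g p, get_package_key d = get_package_key x)
       ∧ (¬ ∃ p ∈ g.keys, get_package_key p ≠ pn ∧ ∃ d ∈ pvDepKeys g p, ∃ m, pvR g (get_package_key d) = some m ∧ pvReach g m x)) := by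
  rw [List.isEmpty_iff, List.filter_eq_nil_iff]
  have h0 : (∀ a ∈ pvGetAllRevA g x, ¬(!(get_package_key a == pn)) = true) ↔
      (∀ pd ∈ g.items,
        ((pd.2.map Prod.fst).any (fun d => get_package_key d == get_package_key x)
          || (pd.2.map Prod.fst).any (fun dep =>
               (pvGetAllDepsA g (g.size+1) dep []).any (fun d => get_package_key x == get_package_key d))) = true
        → get_package_key pd.1 = pn) := by
    constructor
    · intro h pd hpd hc
      have := h pd.1 ((pvRevA_mem g x pd.1).mpr ⟨pd, hpd, hc, rfl⟩)
      simpa using this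
    · intro h a ha
      obtain ⟨pd, hpd, hc, rfl⟩ := (pvRevA_mem g x a).mp ha
      simpa using h pd hpd hc
  rw [h0]
  -- rewrite the per-parent condition into the two ∃-forms
  have h1 : ∀ pd ∈ g.items,
      (((pd.2.map Prod.fst).any (fun d => get_package_key d == get_package_key x)
        || (pd.2.map Prod.fst).any (fun dep =>
             (pvGetAllDepsA g (g.size+1) dep []).any (fun d => get_package_key x == get_package_key d))) = true)
      ↔ ((∃ d ∈ pvDepKeys g pd.1, get_package_key d = get_package_key x)
          ∨ (∃ d ∈ pvDepKeys g pd.1, ∃ m, pvR g (get_package_key d) = some m ∧ pvReach g m x)) := by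
    intro pd hpd
    have hdk : pvDepKeys g pd.1 = pd.2.map Prod.fst := by
      unfold pvDepKeys
      rw [PySem.Dict.getD_of_mem_items g hpd hnd []]
    rw [hdk]
    rw [Bool.or_eq_true]
    simp only [List.any_eq_true, beq_iff_eq]
    constructor
    · rintro (⟨d, hd, hk⟩ | ⟨d, hd, n, hn, hk⟩)
      · exact Or.inl ⟨d, hd, hk⟩
      · exact Or.inr ⟨d, hd, (pvTrans_iff g hnd hne hx d).mp ⟨n, hn, hk⟩⟩
    · rintro (⟨d, hd, hk⟩ | ⟨d, hd, hm⟩)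
      · exact Or.inl ⟨d, hd, hk⟩
      · obtain ⟨n, hn, hk⟩ := (pvTrans_iff g hnd hne hx d).mpr hm
        exact Or.inr ⟨d, hd, n, hn, hk⟩
  constructor
  · intro h
    constructor
    · rintro ⟨p, hp, hnp, hA⟩
      obtain ⟨pd, hpd, rfl⟩ := List.mem_map.mp hp
      exact hnp (h pd hpd ((h1 pd hpd).mpr (Or.inl hA)))
    · rintro ⟨p, hp, hnp, hB⟩
      obtain ⟨pd, hpd, rfl⟩ := List.mem_map.mp hp
      exact hnp (h pd hpd ((h1 pd hpd).mpr (Or.inr hB)))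
  · rintro ⟨hA, hB⟩ pd hpd hc
    by_contra hnp
    have hp : pd.1 ∈ g.keys := List.mem_map.mpr ⟨pd, hpd, rfl⟩
    rcases (h1 pd hpd).mp hc with h | h
    · exact hA ⟨pd.1, hp, hnp, h⟩
    · exact hB ⟨pd.1, hp, hnp, h⟩

lemma pvMain_remove_dependency :
    ∀ (graph : List (String × List (String × String))) (package_name : String),
      Pre_remove_dependency graph package_name →
      remove_dependency graph package_name = remove_dependency_alt graph package_name := by
  intro graph pn hpre
  simp only [remove_dependency, remove_dependency_alt]
  have hnd : (PySem.Dict.ofList graph).keys.Nodup := PySem.Dict.nodup_keys_ofList graph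
  have hne : ∀ k m, pvR (PySem.Dict.ofList graph) k = some m → m ≠ "" := by
    intro k m hr h
    subst h
    obtain ⟨-, hkey', -⟩ := pvR_some _ hr
    have hk0 : get_package_key "" = "" := by decide
    have hkk : k = "" := by rw [← hkey', hk0]
    subst hkk
    unfold pvR at hr
    rw [pvKeys_ofList, pvFind?_ofList] at hr
    exact hpre hr
  cases hfind : (PySem.Dict.ofList graph).keys.find? (fun p => get_package_key p == pn) with
  | none => rfl
  | some tgt =>
    have htgtne : ¬ (tgt = "") := hne pn tgt hfind
    simp only [if_neg htgtne]
    set g := PySem.Dict.ofList graph with hg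
    have hRpn : pvR g pn = some tgt := hfind
    obtain ⟨-, hktgt, hcanontgt⟩ := pvR_some g hRpn
    have hsucc : ∀ p n, n ∈ pvSuccB g (pvFirstB g) p ↔ pvStep g p n := mem_pvSuccB g
    set sd := (g.keys.filter (fun rd => !(get_package_key rd == pn))).flatMap
        (fun p => (pvDepKeys g p).filterMap (fun d => (pvFirstB g).get? (get_package_key d))) with hsddef
    set clA := pvGetAllDepsA g (g.size + 1) tgt [] with hclAdef
    set clB := pvReachB (fun p => pvSuccB g (pvFirstB g) p)
        (([tgt] : List String).length + (g.keys.map (fun p => 1 + (pvSuccB g (pvFirstB g) p).length)).sum) [tgt] [] with hclBdef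
    set lk := PySem.Set.ofList ((g.keys.filter (fun rd => !(get_package_key rd == pn))).flatMap
        (fun p => (pvDepKeys g p).map get_package_key)) with hlkdef
    set lv := pvReachB (fun p => pvSuccB g (pvFirstB g) p)
        (sd.length + (g.keys.map (fun p => 1 + (pvSuccB g (pvFirstB g) p).length)).sum) sd [] with hlvdef
    have hclosA : ∀ w, w ∈ clA ↔ pvReach g tgt w := by
      intro w
      rw [hclAdef, pvDfs_char g hnd hne tgt w]
      constructor
      · rintro ⟨m, hm, hr⟩
        rw [hktgt, hRpn] at hm
        cases hm
        exact hr
      · intro hr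
        exact ⟨tgt, by rw [hktgt]; exact hRpn, hr⟩
    have hseedcanon : ∀ s ∈ sd, pvCanon g s := by
      intro s hs
      rw [hsddef] at hs
      simp only [List.mem_flatMap, List.mem_filterMap, List.mem_filter] at hs
      obtain ⟨p, -, d, -, hr⟩ := hs
      rw [pvFirstB_get?] at hr
      exact (pvR_some g hr).2.2
    have hclosB : ∀ w, w ∈ clB ↔ pvReach g tgt w := by
      intro w
      rw [hclBdef, pvBfs_char g _ hnd hsucc [tgt]
        (by intro s hs; rw [List.mem_singleton] at hs; subst hs; exact hcanontgt) w]
      simp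
    have hlk' : ∀ k, k ∈ lk ↔
        ∃ p ∈ g.keys, get_package_key p ≠ pn ∧ ∃ d ∈ pvDepKeys g p, get_package_key d = k := by
      intro k
      rw [hlkdef, PySem.Set.mem_ofList]
      simp only [List.mem_flatMap, List.mem_filter, List.mem_map]
      constructor
      · rintro ⟨p, ⟨hp, hnp⟩, d, hd, hk⟩
        exact ⟨p, hp, by simpa using hnp, d, hd, hk⟩
      · rintro ⟨p, hp, hnp, d, hd, hk⟩
        exact ⟨p, ⟨hp, by simpa using hnp⟩, d, hd, hk⟩
    have hsd' : ∀ s, s ∈ sd ↔ ∃ p ∈ g.keys, get_package_key p ≠ pn ∧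
        ∃ d ∈ pvDepKeys g p, pvR g (get_package_key d) = some s := by
      intro s
      rw [hsddef]
      simp only [List.mem_flatMap, List.mem_filterMap, List.mem_filter, pvFirstB_get?]
      constructor
      · rintro ⟨p, ⟨hp, hnp⟩, d, hd, hr⟩
        exact ⟨p, hp, by simpa using hnp, d, hd, hr⟩
      · rintro ⟨p, hp, hnp, d, hd, hr⟩
        exact ⟨p, ⟨hp, by simpa using hnp⟩, d, hd, hr⟩
    have hlv' : ∀ w, w ∈ lv ↔ ∃ p ∈ g.keys, get_package_key p ≠ pn ∧ ∃ d ∈ pvDepKeys g p,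
        ∃ m, pvR g (get_package_key d) = some m ∧ pvReach g m w := by
      intro w
      rw [hlvdef, pvBfs_char g _ hnd hsucc sd hseedcanon w]
      constructor
      · rintro ⟨s, hs, hr⟩
        obtain ⟨p, hp, hnp, d, hd, hm⟩ := (hsd' s).mp hs
        exact ⟨p, hp, hnp, d, hd, s, hm, hr⟩
      · rintro ⟨p, hp, hnp, d, hd, m, hm, hr⟩
        exact ⟨m, (hsd' m).mpr ⟨p, hp, hnp, d, hd, hm⟩, hr⟩
    rw [pvEraseFold_items pn
      (fun dep => ((pvGetAllRevA g dep).filter (fun rd => !(get_package_key rd == pn))).isEmpty)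
      clA (g.erase tgt)]
    rw [show (g.erase tgt).items = g.items.filter (fun p => !(p.1 == tgt)) from rfl]
    rw [List.filter_filter]
    apply List.filter_congr
    intro pv hpv
    by_cases htv : (pv.1 == tgt) = true
    · simp [htv]
    · have htvf : (pv.1 == tgt) = false := Bool.eq_false_iff.mpr htv
      simp only [htvf, Bool.not_false, Bool.and_true, Bool.true_and]
      apply Bool.coe_iff_coe.mp
      rw [List.all_eq_true, Bool.not_eq_true', Bool.eq_false_iff]
      simp only [ne_eq, List.contains_iff_mem, List.mem_filter]
      constructor
      · intro hall hmem
        obtain ⟨hinB, hq⟩ := hmem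
        have hxr : pvReach g tgt pv.1 := (hclosB pv.1).mp hinB
        have hinA : pv.1 ∈ clA := (hclosA pv.1).mpr hxr
        have hC := hall pv.1 hinA
        simp at hq
        obtain ⟨⟨hq1, hq2⟩, hq3⟩ := hq
        have hcx : pvCanon g pv.1 := pvCanon_reach g hcanontgt hxr
        have hcond := (pvCondA_iff g hnd hne pn hcx).mpr
          ⟨fun hA => by
              obtain ⟨p, hp, hnp, d, hd, hk⟩ := hA
              exact hq2 ((hlk' (get_package_key pv.1)).mpr ⟨p, hp, hnp, d, hd, hk⟩),
            fun hB => by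
              obtain ⟨p, hp, hnp, d, hd, m, hm, hr⟩ := hB
              exact hq3 ((hlv' pv.1).mpr ⟨p, hp, hnp, d, hd, m, hm, hr⟩)⟩
        simp [hq1, hcond] at hC
      · intro hnmem dep hdep
        by_cases hdx : pv.1 = dep
        · subst hdx
          by_cases hk : get_package_key pv.1 = pn
          · simp [hk]
          · have hxr : pvReach g tgt pv.1 := (hclosA pv.1).mp hdep
            have hcx : pvCanon g pv.1 := pvCanon_reach g hcanontgt hxr
            have hie : ((pvGetAllRevA g pv.1).filter (fun rd => !(get_package_key rd == pn))).isEmpty = false := by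
              by_contra hie0
              have hie' : ((pvGetAllRevA g pv.1).filter (fun rd => !(get_package_key rd == pn))).isEmpty = true :=
                Bool.ne_false_iff.mp hie0
              obtain ⟨hnA, hnB⟩ := (pvCondA_iff g hnd hne pn hcx).mp hie'
              apply hnmem
              refine ⟨(hclosB pv.1).mpr hxr, ?_⟩
              simp
              exact ⟨⟨hk, fun hc => hnA ((hlk' _).mp hc)⟩, fun hc => hnB ((hlv' pv.1).mp hc)⟩
            simp [hie]
        · have : (pv.1 == dep) = false := by simpa using hdx
          simp [this]


-- ===== VERDICT (by name: the statement is the Claim_ definition above) =====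
theorem remove_dependency_spec : Claim_equal_remove_dependency := by
  intro graph package_name _ hpre
  exact pvMain_remove_dependency graph package_name hpre
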